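-- pv_equiv track=rewrite | github.com/AnWang-AI/AugABSA | scripts/text2data/eval_utils.py | seperate_implicit_explict
-- ===== SOURCE A (Python) =====
-- def seperate_implicit_explict(quad_list):
--     EAEO = []
--     IAEO = []
--     EAIO = []
--     IAIO = []
--
--     for quad in quad_list:
--         if quad[1] == "NULL" and quad[2]== "NULL":
--             IAIO.append(quad)
--         elif quad[1] == "NULL" and quad[2]!= "NULL":
--             IAEO.append(quad)
--         elif quad[1] != "NULL" and quad[2] == "NULL":
--             EAIO.append(quad)
--         else:
--             EAEO.append(quad)
--
--     return EAEO, EAIO, IAEO, IAIO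
-- ===== SOURCE B (Python) =====
-- def seperate_implicit_explict(quad_list):
--     def key(q):
--         return (q[1] != "NULL", q[2] != "NULL")
--     return ([q for q in quad_list if key(q) == (True, True)],
--             [q for q in quad_list if key(q) == (True, False)],
--             [q for q in quad_list if key(q) == (False, True)],
--             [q for q in quad_list if key(q) == (False, False)])
-- ===== Notes on version B (the rewrite author's own statement) =====
-- stated objective: alternative
-- what changed: Replaces A's single accumulation pass with a four-branch if/elif chain by four independent filter passes, each selecting quads by a computed (aspect_explicit, opinion_explicit) key; no branch chain and no mutated accumulators.
import Mathlib
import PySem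

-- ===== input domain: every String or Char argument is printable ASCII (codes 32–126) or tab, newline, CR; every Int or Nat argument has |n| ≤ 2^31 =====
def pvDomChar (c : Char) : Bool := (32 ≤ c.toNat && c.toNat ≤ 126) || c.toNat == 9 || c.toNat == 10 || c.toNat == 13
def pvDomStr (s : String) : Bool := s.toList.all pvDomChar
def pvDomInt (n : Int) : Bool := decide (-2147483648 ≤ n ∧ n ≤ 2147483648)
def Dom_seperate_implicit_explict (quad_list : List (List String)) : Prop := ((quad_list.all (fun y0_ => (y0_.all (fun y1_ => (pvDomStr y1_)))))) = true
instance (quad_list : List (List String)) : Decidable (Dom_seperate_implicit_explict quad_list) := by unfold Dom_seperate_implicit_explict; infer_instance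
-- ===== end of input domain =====

-- B replaces A's single accumulation pass with an if/elif chain by four independent key-based filter passes (alternative decomposition, same O(n) cost).


-- ===== PORT A =====
-- loop body of A (the if/elif chain), then the loop as a foldl over the four accumulators;
-- quad[1]/quad[2] are in range under Pre_, ported with pyGetD
def pvStepA (st : List (List String) × List (List String) × List (List String) × List (List String))
    (quad : List String) : List (List String) × List (List String) × List (List String) × List (List String) :=
  let (eaeo, iaeo, eaio, iaio) := st
  if PySem.List.pyGetD quad 1 "" == "NULL" && PySem.List.pyGetD quad 2 "" == "NULL" then
    (eaeo, iaeo, eaio, iaio ++ [quad])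
  else if PySem.List.pyGetD quad 1 "" == "NULL" && !(PySem.List.pyGetD quad 2 "" == "NULL") then
    (eaeo, iaeo ++ [quad], eaio, iaio)
  else if !(PySem.List.pyGetD quad 1 "" == "NULL") && PySem.List.pyGetD quad 2 "" == "NULL" then
    (eaeo, iaeo, eaio ++ [quad], iaio)
  else
    (eaeo ++ [quad], iaeo, eaio, iaio)

def seperate_implicit_explict (quad_list : List (List String)) : List (List String) × List (List String) × List (List String) × List (List String) :=
  let st := quad_list.foldl pvStepA ([], [], [], [])
  (st.1, st.2.2.1, st.2.1, st.2.2.2)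

-- ===== PORT B =====
def pvKey (q : List String) : Bool × Bool :=
  (!(PySem.List.pyGetD q 1 "" == "NULL"), !(PySem.List.pyGetD q 2 "" == "NULL"))

def seperate_implicit_explict_alt (quad_list : List (List String)) : List (List String) × List (List String) × List (List String) × List (List String) :=
  (quad_list.filter (fun q => pvKey q == (true, true)),
   quad_list.filter (fun q => pvKey q == (true, false)),
   quad_list.filter (fun q => pvKey q == (false, true)),
   quad_list.filter (fun q => pvKey q == (false, false)))

-- ===== PRECONDITION & SPEC =====
-- Pre_ excludes exactly the inputs on which Python A raises IndexError: a quad shorter than 3 elements.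
def Pre_seperate_implicit_explict (quad_list : List (List String)) : Prop :=
  ∀ q ∈ quad_list, 3 ≤ q.length
instance (quad_list : List (List String)) : Decidable (Pre_seperate_implicit_explict quad_list) := by unfold Pre_seperate_implicit_explict; infer_instance
def pvWitness_seperate_implicit_explict : List (List String) :=
  [["food", "pizza", "great", "positive"], ["service", "NULL", "slow", "negative"]]

def Spec_seperate_implicit_explict (quad_list : List (List String)) (out : List (List String) × List (List String) × List (List String) × List (List String)) : Prop := out = seperate_implicit_explict_alt quad_list
instance (quad_list : List (List String)) (out : List (List String) × List (List String) × List (List String) × List (List String)) : Decidable (Spec_seperate_implicit_explict quad_list out) := by unfold Spec_seperate_implicit_explict; infer_instance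

-- ===== CLAIM (what is proved, stated in full; the proofs are below) =====
def Claim_equal_seperate_implicit_explict : Prop := ∀ (quad_list : List (List String)), Dom_seperate_implicit_explict quad_list → Pre_seperate_implicit_explict quad_list → Spec_seperate_implicit_explict quad_list (seperate_implicit_explict quad_list)

-- ===== LEMMAS AND PROOFS =====
theorem sep_fold_eq_filter (qs : List (List String)) (e1 e2 e3 e4 : List (List String)) :
    qs.foldl pvStepA (e1, e2, e3, e4)
    = (e1 ++ qs.filter (fun q => pvKey q == (true, true)),
       e2 ++ qs.filter (fun q => pvKey q == (false, true)),
       e3 ++ qs.filter (fun q => pvKey q == (true, false)),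
       e4 ++ qs.filter (fun q => pvKey q == (false, false))) := by
  induction qs generalizing e1 e2 e3 e4 with
  | nil => simp
  | cons q qs ih =>
      rw [List.foldl_cons]
      by_cases h1 : PySem.List.pyGetD q 1 "" == "NULL" <;>
        by_cases h2 : PySem.List.pyGetD q 2 "" == "NULL" <;>
          simp [pvStepA, h1, h2, ih, pvKey]

-- ===== VERDICT (by name: the statement is the Claim_ definition above) =====
theorem seperate_implicit_explict_spec : Claim_equal_seperate_implicit_explict := by
  intro qs _ _
  show _ = _
  unfold seperate_implicit_explict seperate_implicit_explict_alt
  rw [sep_fold_eq_filter]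
  simp
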